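-- pv_equiv track=rewrite | github.com/radiantchoi/PythonPractices | python-for-coding-test-master/solved/exercises/5.py | solution
-- ===== SOURCE A (Python) =====
-- def solution(number, max, balls):
--     result = 0
--
--     weights = [0] * (max + 1)
--     for ball in balls:
--         weights[ball] += 1
--
--     for ball in balls:
--         result += number - weights[ball]
--
--     result /= 2
--     return int(result)
-- ===== SOURCE B (Python) =====
-- def solution(number, max, balls):
--     weights = [0] * (max + 1)
--     for ball in balls:
--         weights[ball] += 1
--
--     total = len(balls) * number - sum(w * w for w in weights)
--     return int(total / 2)
-- ===== Notes on version B (the rewrite author's own statement) =====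
-- stated objective: simpler
-- what changed: The second per-ball pass is replaced by the algebraic closed form total = len(balls)*number - sum(w*w for w in weights): one sum of squared slot counts over the frequency table instead of a lookup per ball; the frequency-building first pass is kept.
import Mathlib
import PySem

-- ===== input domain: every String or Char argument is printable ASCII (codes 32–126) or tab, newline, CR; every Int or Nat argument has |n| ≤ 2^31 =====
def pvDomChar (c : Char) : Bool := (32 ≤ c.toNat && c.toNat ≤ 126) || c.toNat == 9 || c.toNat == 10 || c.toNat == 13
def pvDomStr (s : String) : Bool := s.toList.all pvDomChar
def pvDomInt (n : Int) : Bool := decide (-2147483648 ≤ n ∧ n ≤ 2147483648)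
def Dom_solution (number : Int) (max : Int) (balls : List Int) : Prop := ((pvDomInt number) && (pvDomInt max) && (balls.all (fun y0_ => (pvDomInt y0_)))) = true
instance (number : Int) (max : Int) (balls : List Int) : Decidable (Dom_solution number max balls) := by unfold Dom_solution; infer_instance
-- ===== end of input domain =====

-- B keeps A's frequency-building pass but drops the second per-ball pass in favour of the
-- closed form total = len(balls)*number - sum(w*w for w in weights); same cost, shorter code.

-- ===== PORT A =====
def solution (number : Int) (max : Int) (balls : List Int) : Int :=
  let result : Int := 0
  let weights : List Int := PySem.List.pyRepeat [0] (max + 1)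
  let weights := balls.foldl (fun w ball =>
    PySem.List.pySetD w ball (PySem.List.pyGetD w ball 0 + 1)) weights
  let result := balls.foldl (fun r ball =>
    r + (number - PySem.List.pyGetD weights ball 0)) result
  -- result /= 2; return int(result)  — exact for |result| < 2^53
  PySem.Int.truncdiv result 2

-- ===== PORT B =====
-- the frequency-building 'for ball in balls: weights[ball] += 1' loop of Source B, as structural recursion
def pvBuildWeights : List Int → List Int → List Int
  | w, [] => w
  | w, b :: bs => pvBuildWeights (PySem.List.pySetD w b (PySem.List.pyGetD w b 0 + 1)) bs

def solution_alt (number : Int) (max : Int) (balls : List Int) : Int :=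
  let weights := pvBuildWeights (PySem.List.pyRepeat [0] (max + 1)) balls
  let total := (balls.length : Int) * number - weights.foldl (fun s x => s + x * x) 0
  -- return int(total / 2)  — exact for |total| < 2^53
  PySem.Int.truncdiv total 2

-- ===== PRECONDITION & SPEC =====
-- Pre_ excludes exactly the inputs where 'weights[ball]' raises IndexError in Python
-- (a ball outside the valid index range of the length-(max+1) list).
def Pre_solution (number : Int) (max : Int) (balls : List Int) : Prop :=
  ∀ b ∈ balls, PySem.Raise.InRange (max + 1).toNat b
instance (number : Int) (max : Int) (balls : List Int) : Decidable (Pre_solution number max balls) := by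
  unfold Pre_solution; infer_instance

def pvWitness_solution : Int × Int × List Int := (3, 2, [1, 2, 1])

def Spec_solution (number : Int) (max : Int) (balls : List Int) (out : Int) : Prop := out = solution_alt number max balls
instance (number : Int) (max : Int) (balls : List Int) (out : Int) : Decidable (Spec_solution number max balls out) := by unfold Spec_solution; infer_instance

-- ===== CLAIM (what is proved, stated in full; the proofs are below) =====
def Claim_equal_solution : Prop := ∀ (number : Int) (max : Int) (balls : List Int), Dom_solution number max balls → Pre_solution number max balls → Spec_solution number max balls (solution number max balls)

-- ===== LEMMAS AND PROOFS =====

theorem pvBuild_eq_foldl (balls : List Int) (w : List Int) :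
    pvBuildWeights w balls
      = balls.foldl (fun w b => PySem.List.pySetD w b (PySem.List.pyGetD w b 0 + 1)) w := by
  induction balls generalizing w with
  | nil => rfl
  | cons b bs ih => simp [pvBuildWeights, ih]

-- the Nat index that Python's (possibly negative) index i denotes in a list of length L
def pvNidx (L : Nat) (i : Int) : Nat := if 0 ≤ i then i.toNat else L - (-i).toNat

theorem pvNidx_lt {L : Nat} {i : Int} (h : PySem.Raise.InRange L i) : pvNidx L i < L := by
  rcases h with ⟨h1, h2⟩; unfold pvNidx; split_ifs <;> omega

theorem pvIdx_eq {L : Nat} {i : Int} (h : PySem.Raise.InRange L i) :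
    PySem.List.pyIdx? L i = some (pvNidx L i) := by
  rcases h with ⟨h1, h2⟩
  simp only [PySem.List.pyIdx?, pvNidx]
  split_ifs <;> simp_all

theorem pvGetD_eq {xs : List Int} {i : Int} (d : Int) (h : PySem.Raise.InRange xs.length i) :
    PySem.List.pyGetD xs i d = xs.getD (pvNidx xs.length i) d := by
  simp [PySem.List.pyGetD, PySem.List.pyGet?, pvIdx_eq h, List.getD]

theorem pvSetD_eq {xs : List Int} {i : Int} (v : Int) (h : PySem.Raise.InRange xs.length i) :
    PySem.List.pySetD xs i v = xs.set (pvNidx xs.length i) v := by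
  simp [PySem.List.pySetD, PySem.List.pySet?, pvIdx_eq h]

theorem pvGetD_set (xs : List Int) (n : Nat) (v : Int) (j : Nat) (h : n < xs.length) :
    (xs.set n v).getD j 0 = if j = n then v else xs.getD j 0 := by
  rcases eq_or_ne j n with rfl | hne
  · simp [List.getD, h]
  · simp [List.getD, List.getElem?_set_ne (Ne.symm hne), hne]

-- the frequency-building loop, shared by both ports, characterized by counting
theorem pvFreq (L : Nat) (balls : List Int) (init : List Int)
    (hlen : init.length = L) (hb : ∀ b ∈ balls, PySem.Raise.InRange L b) (j : Nat) :
    (balls.foldl (fun w b => PySem.List.pySetD w b (PySem.List.pyGetD w b 0 + 1)) init).getD j 0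
      = init.getD j 0 + (balls.countP (fun b => pvNidx L b == j) : Int) := by
  induction balls generalizing init with
  | nil => simp
  | cons b bs ih =>
    have hbi : PySem.Raise.InRange init.length b := by rw [hlen]; exact hb b (by simp)
    have hlt : pvNidx L b < L := pvNidx_lt (hb b (by simp))
    rw [List.foldl_cons, pvSetD_eq _ hbi, pvGetD_eq _ hbi, hlen,
        ih _ (by simp [hlen]) (fun x hx => hb x (by simp [hx])),
        pvGetD_set _ _ _ _ (by omega), List.countP_cons]
    split_ifs with h1 h2 <;> simp_all <;> ring

theorem pvSumPoint (L nb : Nat) (h : nb < L) (g : Nat → Int) :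
    ((List.range L).map (fun j => if j = nb then g j else 0)).sum = g nb := by
  induction L with
  | zero => omega
  | succ L ih =>
    rw [List.range_succ, List.map_append, List.sum_append]
    rcases eq_or_ne nb L with rfl | hne
    · have hz : ((List.range nb).map (fun j => if j = nb then g j else 0)).sum = 0 := by
        apply List.sum_eq_zero; intro x hx
        simp only [List.mem_map, List.mem_range] at hx
        obtain ⟨j, hj, rfl⟩ := hx; simp [Nat.ne_of_lt hj]
      simp [hz]
    · rw [ih (by omega)]; simp [Ne.symm hne]

-- per-ball sum = per-value-slot sum weighted by the slot's count
theorem pvSumCounts (L : Nat) (balls : List Int) (hb : ∀ b ∈ balls, PySem.Raise.InRange L b)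
    (g : Nat → Int) :
    (balls.map (fun b => g (pvNidx L b))).sum
      = ((List.range L).map (fun j => (balls.countP (fun b => pvNidx L b == j) : Int) * g j)).sum := by
  induction balls with
  | nil => simp
  | cons b bs ih =>
    have hlt : pvNidx L b < L := pvNidx_lt (hb b (by simp))
    rw [List.map_cons, List.sum_cons, ih (fun x hx => hb x (by simp [hx]))]
    have hmap : (List.range L).map (fun j => ((b :: bs).countP (fun b' => pvNidx L b' == j) : Int) * g j)
        = (List.range L).map (fun j =>
            (bs.countP (fun b' => pvNidx L b' == j) : Int) * g j + (if j = pvNidx L b then g j else 0)) := by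
      apply List.map_congr_left; intro j _
      rw [List.countP_cons]
      rcases eq_or_ne j (pvNidx L b) with rfl | hne
      · simp; ring
      · simp [Ne.symm hne, hne]
    rw [hmap, PySem.List.sum_map_add_int, pvSumPoint L _ hlt]
    ring

theorem pvFoldLen (balls : List Int) (init : List Int) :
    (balls.foldl (fun w b => PySem.List.pySetD w b (PySem.List.pyGetD w b 0 + 1)) init).length
      = init.length := by
  induction balls generalizing init with
  | nil => rfl
  | cons b bs ih => rw [List.foldl_cons, ih, PySem.List.length_pySetD]

theorem pvSumMapSub (l : List Int) (c : Int) (g : Int → Int) :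
    (l.map (fun b => c - g b)).sum = (l.length : Int) * c - (l.map g).sum := by
  induction l with
  | nil => simp
  | cons a t ih => simp [ih]; push_cast; ring

theorem pvMapRange (xs : List Int) (f : Int → Int) :
    xs.map f = (List.range xs.length).map (fun j => f (xs.getD j 0)) := by
  apply List.ext_getElem
  · simp
  · intro i h1 h2
    simp only [List.getElem_map, List.getElem_range]
    have : i < xs.length := by simpa using h1
    simp [List.getD, List.getElem?_eq_getElem this]

-- ===== VERDICT (by name: the statement is the Claim_ definition above) =====
theorem solution_spec : Claim_equal_solution := by
  intro number max balls _ hpre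
  unfold Spec_solution solution solution_alt
  simp only [PySem.List.pyRepeat_singleton, pvBuild_eq_foldl]
  set L := (max + 1).toNat with hL
  set w := balls.foldl (fun w b => PySem.List.pySetD w b (PySem.List.pyGetD w b 0 + 1))
      (List.replicate L (0:Int)) with hw
  have hwlen : w.length = L := by rw [hw, pvFoldLen]; simp
  have hcnt : ∀ j : Nat, w.getD j 0 = (balls.countP (fun b => pvNidx L b == j) : Int) := by
    intro j
    rw [hw, pvFreq L balls _ (by simp) hpre j]
    simp [List.getD]
  congr 1
  -- A's second loop is the sum over balls of (number - weights[ball])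
  rw [PySem.List.foldl_congr_mem _ _
      (fun r b => r + (number - w.getD (pvNidx L b) 0)) 0
      (fun acc b hb => by rw [pvGetD_eq _ (hwlen ▸ hpre b hb), hwlen]),
    PySem.List.foldl_add]
  -- B's sum of squares over the weights table
  rw [PySem.List.foldl_add (g := fun x => x * x)]
  -- split A's sum: Σ_b (number - w[slot b]) = len·number - Σ_b w[slot b]
  rw [pvSumMapSub balls number (fun b => w.getD (pvNidx L b) 0)]
  -- Σ_b w[slot b] = Σ_j w[j]·w[j] = Σ w·w over the table
  have hA : (balls.map (fun b => w.getD (pvNidx L b) 0)).sum = (w.map (fun x => x * x)).sum := by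
    rw [pvSumCounts L balls hpre (fun j => w.getD j 0), pvMapRange w (fun x => x * x), hwlen]
    apply congrArg
    apply List.map_congr_left
    intro j _
    rw [hcnt j]
  rw [hA]
  ring
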